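-- pv_equiv track=rewrite | github.com/Akellade/AdventOfCode | 2021/7/7.py | solve
-- ===== SOURCE A (Python) =====
-- def solve(crabs, rang):
--     lowest = 999999999
--
--     for i in rang:
--         result = 0
--         for crab in crabs:
--             diff = abs(i - crab)
--             result += diff * crabs[crab]
--         if result < lowest:
--             lowest = result
--     return lowest
-- ===== SOURCE B (Python) =====
-- def _prefixes(vals):
--     out = [0]
--     t = 0
--     for v in vals:
--         t += v
--         out.append(t)
--     return out
--
--
-- def solve(crabs, rang):
--     items = sorted(crabs.items(), key=lambda kv: kv[0])
--     pos = [k for k, _ in items]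
--     n = len(items)
--     pw = _prefixes([v for _, v in items])          # prefix sums of weights
--     ps = _prefixes([v * k for k, v in items])      # prefix sums of weighted positions
--     totw = pw[n]
--     tots = ps[n]
--
--     def split(x):
--         # first index with pos[idx] > x (binary search; bisect not imported by A's module)
--         lo, hi = 0, n
--         while lo < hi:
--             mid = (lo + hi) // 2
--             if pos[mid] <= x:
--                 lo = mid + 1
--             else:
--                 hi = mid
--         return lo
--
--     lowest = 999999999
--     for i in rang:
--         j = split(i)
--         result = i * pw[j] - ps[j] + (tots - ps[j]) - i * (totw - pw[j])
--         if result < lowest: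
--             lowest = result
--     return lowest
-- ===== Notes on version B (the rewrite author's own statement) =====
-- stated objective: faster
-- what changed: Instead of re-scanning all crabs (with a dict lookup per crab) for every candidate position, B sorts the (position, weight) pairs once, builds prefix sums of weights and weighted positions, and evaluates each candidate's total weighted distance in O(log N) by binary-searching the split point; Pre_ only excludes association lists with duplicate keys, which cannot arise from a Python dict and on which A's first-match lookup order is accidental.
import Mathlib
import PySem

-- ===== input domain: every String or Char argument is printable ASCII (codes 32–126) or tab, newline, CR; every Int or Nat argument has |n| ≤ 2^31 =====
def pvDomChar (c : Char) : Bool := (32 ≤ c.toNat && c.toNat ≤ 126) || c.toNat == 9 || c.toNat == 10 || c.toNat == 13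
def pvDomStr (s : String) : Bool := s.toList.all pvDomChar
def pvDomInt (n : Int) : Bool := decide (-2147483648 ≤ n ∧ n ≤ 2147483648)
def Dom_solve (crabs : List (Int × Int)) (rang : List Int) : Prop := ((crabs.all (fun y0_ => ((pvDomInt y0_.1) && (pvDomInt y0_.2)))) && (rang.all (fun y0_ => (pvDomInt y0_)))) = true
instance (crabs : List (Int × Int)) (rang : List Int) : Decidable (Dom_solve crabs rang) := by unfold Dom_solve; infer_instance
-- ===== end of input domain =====

-- B replaces A's per-candidate full scan (dict lookup per crab) by sort + prefix sums +
-- binary search: each candidate's total weighted distance in O(log N); measured faster.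

-- ===== PORT A =====
-- `crabs[crab]` is a dict lookup whose key is always present (crab ranges over the keys),
-- so `getD … 0` is exact here (the default is never used).
def solve (crabs : List (Int × Int)) (rang : List Int) : Int :=
  rang.foldl (fun lowest i =>
      let result := crabs.foldl
        (fun r kv => r + |i - kv.1| * (PySem.Dict.mk crabs).getD kv.1 0) 0
      if result < lowest then result else lowest)
    999999999

-- ===== PORT B =====
-- Source B's _prefixes: running total, appending each partial sum to the output list.
def bPrefixes (vals : List Int) : List Int :=
  (vals.foldl (fun (st : List Int × Int) v => (st.1 ++ [st.2 + v], st.2 + v)) ([0], 0)).1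

-- Source B's `split` while-loop; pos[mid] is always in range (lo ≤ mid < hi ≤ len pos), so getD is exact.
def bSplit (pos : List Int) (x : Int) (lo hi : Nat) : Nat :=
  if lo < hi then
    let mid := (lo + hi) / 2
    if pos.getD mid 0 ≤ x then bSplit pos x (mid + 1) hi
    else bSplit pos x lo mid
  else lo
termination_by hi - lo
decreasing_by all_goals omega

-- indices j, n into pw/ps are Nats in range, so getD is exact for Python's pw[j] etc.
def solve_alt (crabs : List (Int × Int)) (rang : List Int) : Int :=
  let items := PySem.List.sorted crabs Prod.fst
  let pos := items.map Prod.fst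
  let n := items.length
  let pw := bPrefixes (items.map (fun kv => kv.2))
  let ps := bPrefixes (items.map (fun kv => kv.2 * kv.1))
  let totw := pw.getD n 0
  let tots := ps.getD n 0
  rang.foldl (fun lowest i =>
      let j := bSplit pos i 0 n
      let result := i * pw.getD j 0 - ps.getD j 0 + (tots - ps.getD j 0)
        - i * (totw - pw.getD j 0)
      if result < lowest then result else lowest)
    999999999

-- ===== PRECONDITION & SPEC =====
-- Pre_ excludes association lists with duplicate keys: the Python argument is a dict, which
-- cannot have duplicate keys, and on such lists A's first-match lookup order is accidental.
def Pre_solve (crabs : List (Int × Int)) (rang : List Int) : Prop :=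
  (crabs.map Prod.fst).Nodup
instance (crabs : List (Int × Int)) (rang : List Int) : Decidable (Pre_solve crabs rang) := by
  unfold Pre_solve; infer_instance
def pvWitness_solve : (List (Int × Int)) × List Int := ([(1, 2), (3, 1)], [2])

def Spec_solve (crabs : List (Int × Int)) (rang : List Int) (out : Int) : Prop := out = solve_alt crabs rang
instance (crabs : List (Int × Int)) (rang : List Int) (out : Int) : Decidable (Spec_solve crabs rang out) := by unfold Spec_solve; infer_instance

-- ===== CLAIM (what is proved, stated in full; the proofs are below) =====
def Claim_equal_solve : Prop := ∀ (crabs : List (Int × Int)) (rang : List Int), Dom_solve crabs rang → Pre_solve crabs rang → Spec_solve crabs rang (solve crabs rang)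

-- ===== LEMMAS AND PROOFS =====

-- bPrefixes is List.scanl (+) 0.
theorem bPrefixes_foldl (l : List Int) (acc : List Int) (t : Int) :
    (l.foldl (fun (st : List Int × Int) v => (st.1 ++ [st.2 + v], st.2 + v)) (acc, t)).1
      = acc ++ (l.scanl (· + ·) t).tail := by
  induction l generalizing acc t with
  | nil => simp
  | cons v l ih =>
      rw [List.foldl_cons, ih, List.scanl_cons]
      cases l <;> simp [List.scanl_cons]

theorem bPrefixes_eq_scanl (vals : List Int) :
    bPrefixes vals = vals.scanl (· + ·) 0 := by
  have h := bPrefixes_foldl vals [0] 0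
  cases vals with
  | nil => simp [bPrefixes]
  | cons v l => rw [bPrefixes, h, List.scanl_cons]; simp

theorem scanl_add_getD (vals : List Int) (t : Int) :
    ∀ j, j ≤ vals.length → (vals.scanl (· + ·) t).getD j 0 = t + (vals.take j).sum := by
  induction vals generalizing t with
  | nil =>
      intro j hj
      have hj0 : j = 0 := by simpa using hj
      subst hj0; simp
  | cons v l ih =>
      intro j hj
      rw [List.scanl_cons]
      cases j with
      | zero => simp
      | succ j =>
          have h := ih (t + v) j (by simpa using hj)
          simp only [List.getD_cons_succ, h, List.take_succ_cons, List.sum_cons]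
          ring

theorem bPrefixes_getD (vals : List Int) (j : Nat) (hj : j ≤ vals.length) :
    (bPrefixes vals).getD j 0 = (vals.take j).sum := by
  rw [bPrefixes_eq_scanl, scanl_add_getD vals 0 j hj, zero_add]

-- characterisation of the split point by what lies left / right of it
def SplitPt (pos : List Int) (x : Int) (j : Nat) : Prop :=
  j ≤ pos.length ∧ (∀ i, i < j → ∀ h : i < pos.length, pos[i] ≤ x) ∧
    (∀ i, j ≤ i → ∀ h : i < pos.length, x < pos[i])

theorem splitPt_unique {pos : List Int} {x : Int} {j₁ j₂ : Nat}
    (h₁ : SplitPt pos x j₁) (h₂ : SplitPt pos x j₂) : j₁ = j₂ := by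
  obtain ⟨hl₁, ha₁, hb₁⟩ := h₁
  obtain ⟨hl₂, ha₂, hb₂⟩ := h₂
  by_contra hne
  rcases Nat.lt_or_ge j₁ j₂ with h | h
  · have hlt : j₁ < pos.length := lt_of_lt_of_le h hl₂
    exact absurd (ha₂ j₁ h hlt) (not_le.mpr (hb₁ j₁ le_rfl hlt))
  · have h' : j₂ < j₁ := by omega
    have hlt : j₂ < pos.length := lt_of_lt_of_le h' hl₁
    exact absurd (ha₁ j₂ h' hlt) (not_le.mpr (hb₂ j₂ le_rfl hlt))

theorem not_p_at_takeWhile_len {α : Type} (p : α → Bool) (l : List α)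
    (h : (l.takeWhile p).length < l.length) :
    p (l[(l.takeWhile p).length]'h) = false := by
  induction l with
  | nil => simp at h
  | cons a l ih =>
      by_cases hp : p a
      · simpa [List.takeWhile_cons, hp] using ih (by simpa [List.takeWhile_cons, hp] using h)
      · simpa [List.takeWhile_cons, hp] using hp

theorem takeWhile_len_splitPt (pos : List Int) (x : Int)
    (hs : pos.Pairwise (· ≤ ·)) :
    SplitPt pos x ((pos.takeWhile (fun p => decide (p ≤ x))).length) := by
  set p : Int → Bool := fun p => decide (p ≤ x) with hp
  set t := (pos.takeWhile p).length with ht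
  have hle : t ≤ pos.length := (List.takeWhile_prefix p).length_le
  refine ⟨hle, ?_, ?_⟩
  · intro i hi h
    have h' : i < (pos.takeWhile p).length := hi
    have := List.mem_takeWhile_imp (List.getElem_mem h')
    rw [(List.takeWhile_prefix p).getElem h'] at this
    simpa [hp] using this
  · intro i hti h
    have htlen : t < pos.length := lt_of_le_of_lt hti h
    have hnp : p (pos[t]'htlen) = false := not_p_at_takeWhile_len p pos htlen
    have hxt : x < pos[t]'htlen := by simpa [hp] using hnp
    rcases Nat.eq_or_lt_of_le hti with rfl | hlt
    · exact hxt
    · exact lt_of_lt_of_le hxt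
        (List.pairwise_iff_getElem.mp hs t i htlen h hlt)

theorem bSplit_splitPt (pos : List Int) (x : Int)
    (hs : pos.Pairwise (· ≤ ·)) :
    ∀ lo hi, lo ≤ hi → hi ≤ pos.length →
      (∀ i, i < lo → ∀ h : i < pos.length, pos[i] ≤ x) →
      (∀ i, hi ≤ i → ∀ h : i < pos.length, x < pos[i]) →
      SplitPt pos x (bSplit pos x lo hi) := by
  intro lo hi
  generalize hn : hi - lo = n
  induction n using Nat.strong_induction_on generalizing lo hi with
  | _ n ih =>
    intro hlohi hhi hlow hhigh
    rw [bSplit]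
    by_cases hlt : lo < hi
    · simp only [hlt, if_true]
      have hmidlt : (lo + hi) / 2 < hi := by omega
      have hmidge : lo ≤ (lo + hi) / 2 := by omega
      have hmlen : (lo + hi) / 2 < pos.length := lt_of_lt_of_le hmidlt hhi
      by_cases hc : pos.getD ((lo + hi) / 2) 0 ≤ x
      · simp only [hc, if_true]
        refine ih (hi - ((lo + hi) / 2 + 1)) (by omega) _ _ rfl (by omega) hhi ?_ hhigh
        intro i hi' h
        have hle : pos[i] ≤ pos[(lo + hi) / 2]'hmlen := by
          rcases Nat.eq_or_lt_of_le (Nat.lt_succ_iff.mp hi') with heq | hlt'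
          · subst heq; exact le_rfl
          · exact List.pairwise_iff_getElem.mp hs i _ h hmlen hlt'
        have : pos.getD ((lo + hi) / 2) 0 = pos[(lo + hi) / 2]'hmlen :=
          List.getD_eq_getElem pos 0 hmlen
        omega
      · simp only [hc, if_false]
        refine ih (((lo + hi) / 2) - lo) (by omega) _ _ rfl (by omega)
          (le_of_lt hmlen) hlow ?_
        intro i hi' h
        have hge : pos[(lo + hi) / 2]'hmlen ≤ pos[i] := by
          rcases Nat.eq_or_lt_of_le hi' with heq | hlt'
          · subst heq; exact le_rfl
          · exact List.pairwise_iff_getElem.mp hs _ i hmlen h hlt'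
        have : pos.getD ((lo + hi) / 2) 0 = pos[(lo + hi) / 2]'hmlen :=
          List.getD_eq_getElem pos 0 hmlen
        omega
    · simp only [hlt, if_false]
      have : lo = hi := by omega
      subst this
      exact ⟨hhi, fun i hi' h => hlow i hi' h, fun i hi' h => hhigh i hi' h⟩

theorem bSplit_eq_takeWhile (pos : List Int) (x : Int)
    (hs : pos.Pairwise (· ≤ ·)) :
    bSplit pos x 0 pos.length = (pos.takeWhile (fun p => decide (p ≤ x))).length := by
  refine splitPt_unique (bSplit_splitPt pos x hs 0 pos.length (Nat.zero_le _) le_rfl ?_ ?_)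
    (takeWhile_len_splitPt pos x hs)
  · intro i hi; omega
  · intro i hi h; omega

-- pointwise sums on the two halves
theorem sum_left (x : Int) (l : List (Int × Int)) (h : ∀ kv ∈ l, kv.1 ≤ x) :
    (l.map (fun kv => |x - kv.1| * kv.2)).sum
      = x * (l.map (fun kv => kv.2)).sum - (l.map (fun kv => kv.2 * kv.1)).sum := by
  induction l with
  | nil => simp
  | cons kv l ih =>
      have h1 : kv.1 ≤ x := h kv (List.mem_cons_self)
      have := ih (fun a ha => h a (List.mem_cons_of_mem _ ha))
      simp only [List.map_cons, List.sum_cons, this, abs_of_nonneg (by omega : (0:Int) ≤ x - kv.1)]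
      ring

theorem sum_right (x : Int) (l : List (Int × Int)) (h : ∀ kv ∈ l, x < kv.1) :
    (l.map (fun kv => |x - kv.1| * kv.2)).sum
      = (l.map (fun kv => kv.2 * kv.1)).sum - x * (l.map (fun kv => kv.2)).sum := by
  induction l with
  | nil => simp
  | cons kv l ih =>
      have h1 : x < kv.1 := h kv (List.mem_cons_self)
      have := ih (fun a ha => h a (List.mem_cons_of_mem _ ha))
      simp only [List.map_cons, List.sum_cons, this, abs_of_nonpos (by omega : x - kv.1 ≤ (0:Int))]
      ring

-- all elements past the takeWhile split of a sorted list are > x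
theorem dropWhile_gt (x : Int) (l : List (Int × Int))
    (hs : (l.map Prod.fst).Pairwise (· ≤ ·)) :
    ∀ kv ∈ l.dropWhile (fun kv => decide (kv.1 ≤ x)), x < kv.1 := by
  induction l with
  | nil => simp
  | cons a l ih =>
      intro kv hkv
      rw [List.map_cons, List.pairwise_cons] at hs
      rw [List.dropWhile_cons] at hkv
      by_cases hp : a.1 ≤ x
      · rw [if_pos (by simpa using hp)] at hkv
        exact ih hs.2 kv hkv
      · rw [if_neg (by simpa using hp)] at hkv
        have hax : x < a.1 := by omega
        rcases List.mem_cons.mp hkv with rfl | hmem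
        · exact hax
        · exact lt_of_lt_of_le hax (hs.1 kv.1 (List.mem_map_of_mem hmem))

-- B's per-candidate cost expression (proof-side name for the body of solve_alt's loop)
def costB (crabs : List (Int × Int)) (x : Int) : Int :=
  let items := PySem.List.sorted crabs Prod.fst
  let pos := items.map Prod.fst
  let n := items.length
  let pw := bPrefixes (items.map (fun kv => kv.2))
  let ps := bPrefixes (items.map (fun kv => kv.2 * kv.1))
  let totw := pw.getD n 0
  let tots := ps.getD n 0
  let j := bSplit pos x 0 n
  x * pw.getD j 0 - ps.getD j 0 + (tots - ps.getD j 0) - x * (totw - pw.getD j 0)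

-- A's inner loop equals B's prefix-sum formula, for every candidate x
theorem cost_eq (crabs : List (Int × Int)) (hnd : (crabs.map Prod.fst).Nodup) (x : Int) :
    crabs.foldl (fun r kv => r + |x - kv.1| * (PySem.Dict.mk crabs).getD kv.1 0) 0
      = costB crabs x := by
  have hperm : (PySem.List.sorted crabs Prod.fst).Perm crabs :=
    PySem.List.sorted_perm crabs Prod.fst false
  have hpair : (PySem.List.sorted crabs Prod.fst).Pairwise (fun a b => a.1 ≤ b.1) :=
    PySem.List.sorted_pairwise crabs Prod.fst
  set items := PySem.List.sorted crabs Prod.fst with hitems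
  have hpairpos : (items.map Prod.fst).Pairwise (· ≤ ·) :=
    hpair.map Prod.fst (fun a b h => h)
  set pr : Int × Int → Bool := fun kv => decide (kv.1 ≤ x) with hpr
  set tW := items.takeWhile pr with htW
  set dW := items.dropWhile pr with hdW
  -- A's loop is the sum of |x - k| * v over crabs
  have hlkp : ∀ (acc : Int), ∀ kv ∈ crabs,
      acc + |x - kv.1| * (PySem.Dict.mk crabs).getD kv.1 0
        = acc + |x - kv.1| * kv.2 := by
    intro acc kv hkv
    have h1 : (PySem.Dict.mk crabs).get? kv.1 = some kv.2 :=
      PySem.Dict.get?_of_mem_items (PySem.Dict.mk crabs)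
        (by simpa using hkv) hnd
    simp [PySem.Dict.getD, h1]
  rw [PySem.List.foldl_congr_mem _ _ _ _ hlkp, PySem.List.foldl_add, zero_add]
  -- and hence the same sum over the sorted items
  have hsum : (crabs.map (fun kv => |x - kv.1| * kv.2)).sum
      = (items.map (fun kv => |x - kv.1| * kv.2)).sum :=
    ((hperm.map (fun kv => |x - kv.1| * kv.2)).sum_eq).symm
  rw [hsum]
  -- the binary search lands at the takeWhile split
  have hj : bSplit (items.map Prod.fst) x 0 items.length = tW.length := by
    rw [show items.length = (items.map Prod.fst).length by simp,
      bSplit_eq_takeWhile (items.map Prod.fst) x hpairpos,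
      List.takeWhile_map, List.length_map]
    rfl
  -- prefix-sum reads are sums over the takeWhile prefix / the whole list
  have htake : items.take tW.length = tW :=
    ((List.prefix_iff_eq_take).mp (List.takeWhile_prefix pr)).symm
  have htWlen : tW.length ≤ items.length := (List.takeWhile_prefix pr).length_le
  have hpwj : (bPrefixes (items.map (fun kv => kv.2))).getD tW.length 0
      = (tW.map (fun kv => kv.2)).sum := by
    rw [bPrefixes_getD _ _ (by simpa using htWlen), ← List.map_take, htake]
  have hpsj : (bPrefixes (items.map (fun kv => kv.2 * kv.1))).getD tW.length 0
      = (tW.map (fun kv => kv.2 * kv.1)).sum := by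
    rw [bPrefixes_getD _ _ (by simpa using htWlen), ← List.map_take, htake]
  have hpwn : (bPrefixes (items.map (fun kv => kv.2))).getD items.length 0
      = (items.map (fun kv => kv.2)).sum := by
    rw [bPrefixes_getD _ _ (by simp), ← List.map_take, List.take_length]
  have hpsn : (bPrefixes (items.map (fun kv => kv.2 * kv.1))).getD items.length 0
      = (items.map (fun kv => kv.2 * kv.1)).sum := by
    rw [bPrefixes_getD _ _ (by simp), ← List.map_take, List.take_length]
  -- split the sums at the takeWhile boundary
  have hsplit : tW ++ dW = items := List.takeWhile_append_dropWhile
  have hL : (items.map (fun kv => |x - kv.1| * kv.2)).sum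
      = (tW.map (fun kv => |x - kv.1| * kv.2)).sum
        + (dW.map (fun kv => |x - kv.1| * kv.2)).sum := by
    rw [← hsplit]; simp
  have hW : (items.map (fun kv => kv.2)).sum
      = (tW.map (fun kv => kv.2)).sum + (dW.map (fun kv => kv.2)).sum := by
    rw [← hsplit]; simp
  have hS : (items.map (fun kv => kv.2 * kv.1)).sum
      = (tW.map (fun kv => kv.2 * kv.1)).sum + (dW.map (fun kv => kv.2 * kv.1)).sum := by
    rw [← hsplit]; simp
  have hleft := sum_left x tW (fun kv hkv => by
    simpa [hpr] using List.mem_takeWhile_imp hkv)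
  have hright := sum_right x dW (dropWhile_gt x items hpairpos)
  show _ = costB crabs x
  rw [costB]
  simp only [← hitems, hj, hpwj, hpsj, hpwn, hpsn, hL, hW, hS, hleft, hright]
  ring

-- ===== VERDICT (by name: the statement is the Claim_ definition above) =====
theorem solve_spec : Claim_equal_solve := by
  intro crabs rang _hdom hpre
  unfold Spec_solve solve solve_alt
  refine PySem.List.foldl_congr_mem rang _ _ _ ?_
  intro acc i _
  simp only [cost_eq crabs hpre i, costB]
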